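-- pv_equiv track=rewrite | github.com/wilsonwolf/ask_mary | src/services/elevenlabs_client.py | _build_screening_questions
-- ===== SOURCE A (Python) =====
-- def _build_screening_questions(
--     inclusion: dict,
--     exclusion: dict,
-- ) -> str:
--     """Build screening questions with exact question_keys for the agent.
--
--     Groups min_/max_ pairs into a single question (e.g. min_age +
--     max_age become one "age" question). Tells the agent exactly which
--     ``question_key`` to pass to ``record_screening_answer``.
--
--     Args:
--         inclusion: Inclusion criteria dict.
--         exclusion: Exclusion criteria dict.
--
--     Returns:
--         Formatted string listing each screening question and its key.
--     """
--     questions: list[str] = []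
--     seen_bases: set[str] = set()
--
--     for key, _value in inclusion.items():
--         base = _get_base_key(key)
--         if base in seen_bases:
--             continue
--         seen_bases.add(base)
--         label = base.replace("_", " ")
--         partner_keys = [k for k in inclusion if _get_base_key(k) == base]
--         constraints = []
--         for pk in partner_keys:
--             pv = inclusion[pk]
--             if "min" in pk:
--                 constraints.append(f"at least {pv}")
--             elif "max" in pk:
--                 constraints.append(f"at most {pv}")
--             else:
--                 constraints.append(str(pv))
--         constraint_text = ", ".join(constraints)
--         questions.append(f'- question_key="{base}": Ask about their {label}. [{constraint_text}]')
--
--     for key in exclusion: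
--         label = key.replace("_", " ")
--         questions.append(f'- question_key="{key}": Ask if they have/are {label}. [EXCLUDE if yes]')
--
--     if not questions:
--         return "- No screening questions defined"
--     return "\n".join(questions)
--
-- def _get_base_key(key: str) -> str:
--     """Strip min_/max_ prefix or _min/_max suffix from a key.
--
--     Args:
--         key: Criterion key.
--
--     Returns:
--         Base key name.
--     """
--     for prefix in ("min_", "max_"):
--         if key.startswith(prefix):
--             return key[len(prefix) :]
--     for suffix in ("_min", "_max"):
--         if key.endswith(suffix):
--             return key[: -len(suffix)]
--     return key
-- ===== SOURCE B (Python) =====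
-- def _build_screening_questions(
--     inclusion: dict,
--     exclusion: dict,
-- ) -> str:
--     """Build screening questions with exact question_keys for the agent.
--
--     One pass: group each criterion's constraint text under its base key in an
--     (insertion-ordered) dict, then emit one line per base.
--     """
--     groups: dict = {}
--     for key, value in inclusion.items():
--         if "min" in key:
--             constraint = f"at least {value}"
--         elif "max" in key:
--             constraint = f"at most {value}"
--         else:
--             constraint = str(value)
--         groups.setdefault(_base_key(key), []).append(constraint)
--     lines = [
--         f'- question_key="{base}": Ask about their {base.replace("_", " ")}. [{", ".join(cs)}]'
--         for base, cs in groups.items()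
--     ]
--     lines += [
--         f'- question_key="{key}": Ask if they have/are {key.replace("_", " ")}. [EXCLUDE if yes]'
--         for key in exclusion
--     ]
--     if not lines:
--         return "- No screening questions defined"
--     return "\n".join(lines)
--
--
-- def _base_key(key: str) -> str:
--     if key.startswith("min_") or key.startswith("max_"):
--         return key[4:]
--     if key.endswith("_min") or key.endswith("_max"):
--         return key[:-4]
--     return key
-- ===== Notes on version B (the rewrite author's own statement) =====
-- stated objective: faster
-- what changed: A rescans the whole inclusion dict for partner keys at every unseen base; B makes one pass that groups each key's constraint text under its base in an insertion-ordered dict and then emits one line per group.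
import Mathlib
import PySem

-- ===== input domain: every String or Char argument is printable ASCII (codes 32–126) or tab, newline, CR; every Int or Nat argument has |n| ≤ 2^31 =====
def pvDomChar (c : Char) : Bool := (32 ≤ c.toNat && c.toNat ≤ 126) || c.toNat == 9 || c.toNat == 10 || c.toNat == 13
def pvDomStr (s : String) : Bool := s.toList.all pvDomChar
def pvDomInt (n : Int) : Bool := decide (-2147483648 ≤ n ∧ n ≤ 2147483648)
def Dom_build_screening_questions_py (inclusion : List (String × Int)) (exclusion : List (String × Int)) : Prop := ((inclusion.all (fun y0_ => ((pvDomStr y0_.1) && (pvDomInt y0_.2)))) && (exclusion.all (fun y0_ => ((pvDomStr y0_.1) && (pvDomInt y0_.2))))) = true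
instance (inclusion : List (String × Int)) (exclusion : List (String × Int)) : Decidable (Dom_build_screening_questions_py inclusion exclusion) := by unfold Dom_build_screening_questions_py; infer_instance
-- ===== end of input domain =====

-- B replaces A's quadratic rescan of the whole dict for each base with a single
-- grouping pass over an ordered dict (objective: faster, O(n^2) → O(n)).
-- Equivalence is about the RETURN value; neither program mutates its arguments.

-- ===== PORT A =====
-- _get_base_key: the two prefix tests, then the two suffix tests, in order
def getBaseKeyA (key : String) : String :=
  if PySem.Str.startswith key "min_" then PySem.Str.slice key (some 4) none
  else if PySem.Str.startswith key "max_" then PySem.Str.slice key (some 4) none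
  else if PySem.Str.endswith key "_min" then PySem.Str.slice key none (some (-4))
  else if PySem.Str.endswith key "_max" then PySem.Str.slice key none (some (-4))
  else key

-- the inner constraint computation for one partner key pk; the dict lookup
-- inclusion[pk] is getD with an arbitrary default, exact because pk is always a key
def aConstraint (inclusion : List (String × Int)) (pk : String) : String :=
  let pv := (PySem.Dict.mk inclusion).getD pk 0
  if PySem.Str.isIn "min" pk then "at least " ++ PySem.Int.toStr pv
  else if PySem.Str.isIn "max" pk then "at most " ++ PySem.Int.toStr pv
  else PySem.Int.toStr pv

-- the question line A builds for one unseen base (label, partner scan, constraints)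
def aLine (inclusion : List (String × Int)) (base : String) : String :=
  let label := PySem.Str.replace base "_" " "
  let partner_keys := (inclusion.filter (fun p => getBaseKeyA p.1 == base)).map Prod.fst
  let constraints := partner_keys.map (aConstraint inclusion)
  let constraint_text := PySem.Str.join ", " constraints
  "- question_key=\"" ++ base ++ "\": Ask about their " ++ label ++ ". [" ++ constraint_text ++ "]"

-- one iteration of A's first loop, carrying (questions, seen_bases)
def aStep (inclusion : List (String × Int)) (st : List String × PySem.Set String) (kv : String × Int) : List String × PySem.Set String :=
  let base := getBaseKeyA kv.1
  if PySem.Set.contains st.2 base then st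
  else (st.1 ++ [aLine inclusion base], PySem.Set.add st.2 base)

def build_screening_questions_py (inclusion : List (String × Int)) (exclusion : List (String × Int)) : String :=
  let st := inclusion.foldl (aStep inclusion) ([], PySem.Set.empty)
  let questions := exclusion.foldl (fun qs (kv : String × Int) =>
    qs ++ ["- question_key=\"" ++ kv.1 ++ "\": Ask if they have/are " ++ PySem.Str.replace kv.1 "_" " " ++ ". [EXCLUDE if yes]"]) st.1
  if questions.isEmpty then "- No screening questions defined"
  else PySem.Str.join "\n" questions

-- ===== PORT B =====
def baseKeyB (key : String) : String :=
  if PySem.Str.startswith key "min_" || PySem.Str.startswith key "max_" then PySem.Str.slice key (some 4) none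
  else if PySem.Str.endswith key "_min" || PySem.Str.endswith key "_max" then PySem.Str.slice key none (some (-4))
  else key

def constraintOfB (key : String) (value : Int) : String :=
  if PySem.Str.isIn "min" key then "at least " ++ PySem.Int.toStr value
  else if PySem.Str.isIn "max" key then "at most " ++ PySem.Int.toStr value
  else PySem.Int.toStr value

def bLine (p : String × List String) : String :=
  "- question_key=\"" ++ p.1 ++ "\": Ask about their " ++ PySem.Str.replace p.1 "_" " " ++ ". [" ++ PySem.Str.join ", " p.2 ++ "]"

def build_screening_questions_py_alt (inclusion : List (String × Int)) (exclusion : List (String × Int)) : String :=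
  -- groups.setdefault(base, []).append(c)  =  groups[base] = groups.get(base, []) + [c]
  let groups : PySem.Dict String (List String) :=
    inclusion.foldl (fun g kv => g.modify (baseKeyB kv.1) [] (fun cs => cs ++ [constraintOfB kv.1 kv.2])) PySem.Dict.empty
  let lines := groups.items.map bLine
    ++ exclusion.map (fun kv => "- question_key=\"" ++ kv.1 ++ "\": Ask if they have/are " ++ PySem.Str.replace kv.1 "_" " " ++ ". [EXCLUDE if yes]")
  if lines.isEmpty then "- No screening questions defined"
  else PySem.Str.join "\n" lines

-- ===== PRECONDITION & SPEC =====
-- Both arguments encode Python dicts, which cannot hold duplicate keys; Pre_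
-- restricts the association lists to those representing genuine dicts (distinct keys).
def Pre_build_screening_questions_py (inclusion : List (String × Int)) (exclusion : List (String × Int)) : Prop :=
  (inclusion.map Prod.fst).Nodup ∧ (exclusion.map Prod.fst).Nodup
instance (inclusion : List (String × Int)) (exclusion : List (String × Int)) : Decidable (Pre_build_screening_questions_py inclusion exclusion) := by unfold Pre_build_screening_questions_py; infer_instance

def pvWitness_build_screening_questions_py : (List (String × Int)) × (List (String × Int)) :=
  ([("min_age", 18), ("max_age", 65), ("city", 7)], [("smoker", 1)])

def Spec_build_screening_questions_py (inclusion : List (String × Int)) (exclusion : List (String × Int)) (out : String) : Prop := out = build_screening_questions_py_alt inclusion exclusion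
instance (inclusion : List (String × Int)) (exclusion : List (String × Int)) (out : String) : Decidable (Spec_build_screening_questions_py inclusion exclusion out) := by unfold Spec_build_screening_questions_py; infer_instance

-- ===== CLAIM (what is proved, stated in full; the proofs are below) =====
def Claim_equal_build_screening_questions_py : Prop := ∀ (inclusion : List (String × Int)) (exclusion : List (String × Int)), Dom_build_screening_questions_py inclusion exclusion → Pre_build_screening_questions_py inclusion exclusion → Spec_build_screening_questions_py inclusion exclusion (build_screening_questions_py inclusion exclusion)

-- ===== LEMMAS AND PROOFS =====

theorem baseKey_eq (k : String) : baseKeyB k = getBaseKeyA k := by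
  unfold baseKeyB getBaseKeyA
  cases h1 : PySem.Str.startswith k "min_" <;>
    cases h2 : PySem.Str.startswith k "max_" <;>
      cases h3 : PySem.Str.endswith k "_min" <;>
        cases h4 : PySem.Str.endswith k "_max" <;> simp

-- the list of first occurrences of bases not yet in s, in order
def nbBases (s : PySem.Set String) : List String → List String
  | [] => []
  | b :: bs => if PySem.Set.contains s b then nbBases s bs else b :: nbBases (PySem.Set.add s b) bs

theorem update_eq_append_nbBases (bs : List String) : ∀ s : PySem.Set String,
    PySem.Set.update s bs = s ++ nbBases s bs := by
  induction bs with
  | nil => intro s; simp [nbBases, PySem.Set.update]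
  | cons b bs ih =>
    intro s
    simp only [PySem.Set.update, List.foldl_cons] at ih ⊢
    by_cases h : b ∈ s
    · have hadd : PySem.Set.add s b = s := by simp [PySem.Set.add, h]
      rw [hadd, ih s]
      simp [nbBases, h]
    · have hadd : PySem.Set.add s b = s ++ [b] := by simp [PySem.Set.add, h]
      rw [ih (PySem.Set.add s b), hadd]
      simp [nbBases, h]

theorem aLoop (inc : List (String × Int)) : ∀ (t : List (String × Int)) (qs : List String) (s : PySem.Set String),
    (t.foldl (aStep inc) (qs, s)).1 = qs ++ (nbBases s (t.map (fun kv => getBaseKeyA kv.1))).map (aLine inc) := by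
  intro t
  induction t with
  | nil => intro qs s; simp [nbBases]
  | cons kv t ih =>
    intro qs s
    by_cases h : getBaseKeyA kv.1 ∈ s <;> simp [aStep, h, nbBases, ih]

theorem bFold_eq (inc : List (String × Int)) (d : PySem.Dict String (List String)) :
    inc.foldl (fun g kv => g.modify (baseKeyB kv.1) [] (fun cs => cs ++ [constraintOfB kv.1 kv.2])) d
      = ((inc.map (fun kv => (baseKeyB kv.1, constraintOfB kv.1 kv.2))).foldl
          (fun d p => d.modify p.1 [] (fun cs => cs ++ [p.2])) d) := by
  rw [List.foldl_map]

-- pointwise equality of the per-base lines, given distinct keys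
theorem line_eq (inc : List (String × Int)) (hnd : (inc.map Prod.fst).Nodup) (b : String) :
    aLine inc b = bLine (b, (inc.filter (fun kv => getBaseKeyA kv.1 == b)).map (fun kv => constraintOfB kv.1 kv.2)) := by
  have hkeys : (PySem.Dict.mk inc).keys.Nodup := by
    simpa [PySem.Dict.keys, PySem.Dict.items] using hnd
  have hc : ∀ p ∈ inc.filter (fun kv => getBaseKeyA kv.1 == b),
      aConstraint inc p.1 = constraintOfB p.1 p.2 := by
    intro p hp
    have hpm : p ∈ inc := List.mem_of_mem_filter hp
    have hpv : (PySem.Dict.mk inc).getD p.1 0 = p.2 :=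
      PySem.Dict.getD_of_mem_items (PySem.Dict.mk inc) (by simpa [PySem.Dict.items] using hpm) hkeys 0
    simp only [aConstraint, constraintOfB, hpv]
  simp only [aLine, bLine, List.map_map]
  have : (inc.filter (fun p => getBaseKeyA p.1 == b)).map (aConstraint inc ∘ Prod.fst)
      = (inc.filter (fun kv => getBaseKeyA kv.1 == b)).map (fun kv => constraintOfB kv.1 kv.2) :=
    List.map_congr_left (fun p hp => hc p hp)
  simp [this]

theorem build_spec (inclusion exclusion : List (String × Int))
    (hpre : Pre_build_screening_questions_py inclusion exclusion) :
    build_screening_questions_py inclusion exclusion = build_screening_questions_py_alt inclusion exclusion := by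
  obtain ⟨hinc, -⟩ := hpre
  unfold build_screening_questions_py build_screening_questions_py_alt
  dsimp only
  -- the grouping dict of B
  set groups := inclusion.foldl (fun g kv => g.modify (baseKeyB kv.1) [] (fun cs => cs ++ [constraintOfB kv.1 kv.2])) PySem.Dict.empty with hg
  have hkeys : groups.keys = PySem.Set.update (PySem.Dict.empty : PySem.Dict String (List String)).keys (inclusion.map (fun kv => baseKeyB kv.1)) := by
    rw [hg]
    exact PySem.Dict.keys_foldl_modify_key inclusion (fun kv => baseKeyB kv.1) []
      (fun _ kv => fun cs => cs ++ [constraintOfB kv.1 kv.2]) PySem.Dict.empty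
  have hnodup : groups.keys.Nodup := by
    rw [hg]
    exact PySem.Dict.nodup_keys_foldl_modify_key inclusion (fun kv => baseKeyB kv.1) []
      (fun _ kv => fun cs => cs ++ [constraintOfB kv.1 kv.2]) PySem.Dict.empty (by simp)
  have hgetD : ∀ b, groups.getD b [] = (inclusion.filter (fun kv => getBaseKeyA kv.1 == b)).map (fun kv => constraintOfB kv.1 kv.2) := by
    intro b
    rw [hg, bFold_eq]
    rw [PySem.Dict.getD_foldl_modify_append]
    simp [List.filter_map, Function.comp_def, baseKey_eq]
  have hitems : groups.items = (nbBases PySem.Set.empty (inclusion.map (fun kv => getBaseKeyA kv.1))).map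
      (fun b => (b, groups.getD b [])) := by
    rw [PySem.Dict.items_eq_map_keys groups hnodup [], hkeys]
    have : PySem.Set.update (PySem.Dict.empty : PySem.Dict String (List String)).keys (inclusion.map (fun kv => baseKeyB kv.1))
        = nbBases PySem.Set.empty (inclusion.map (fun kv => getBaseKeyA kv.1)) := by
      have h1 : (inclusion.map (fun kv => baseKeyB kv.1)) = inclusion.map (fun kv => getBaseKeyA kv.1) := by
        simp [baseKey_eq]
      rw [h1]
      simpa using update_eq_append_nbBases (inclusion.map (fun kv => getBaseKeyA kv.1)) PySem.Set.empty
    rw [this]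
  -- A's first loop
  rw [aLoop inclusion inclusion [] PySem.Set.empty]
  -- A's second loop as a map
  rw [PySem.List.foldl_append_singleton_eq_map
    (fun kv : String × Int => "- question_key=\"" ++ kv.1 ++ "\": Ask if they have/are " ++ PySem.Str.replace kv.1 "_" " " ++ ". [EXCLUDE if yes]")]
  rw [hitems]
  simp only [List.map_map, List.nil_append]
  have hline : (nbBases PySem.Set.empty (inclusion.map (fun kv => getBaseKeyA kv.1))).map (aLine inclusion)
      = (nbBases PySem.Set.empty (inclusion.map (fun kv => getBaseKeyA kv.1))).map
          (bLine ∘ fun b => (b, groups.getD b [])) := by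
    refine List.map_congr_left (fun b _ => ?_)
    simp only [Function.comp_apply, hgetD b]
    exact line_eq inclusion hinc b
  rw [hline]

-- ===== VERDICT (by name: the statement is the Claim_ definition above) =====
theorem build_screening_questions_py_spec : Claim_equal_build_screening_questions_py := by
  intro inclusion exclusion _ hpre
  unfold Spec_build_screening_questions_py
  exact build_spec inclusion exclusion hpre
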